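-- pv_equiv track=rewrite | github.com/najibninaba/CascadedFCN | src/showing_images.py | get_all_pixel_levels
-- ===== SOURCE A (Python) =====
-- def get_all_pixel_levels(images):
--     '''
--     Function that gets all the different pixel levels for a given stack of images
--
--     Inputs:
--     images: a stack of images
--
--     Outputs:
--     returns a sorted list of different pixel values
--     '''
--     temp = []
--     for i in images:
--         for j in i:
--             for k in j:
--                 if k not in temp:
--                     temp.append(k)
--     temp.sort()
--     return temp
-- ===== SOURCE B (Python) =====
-- def get_all_pixel_levels(images):
--     '''
--     Function that gets all the different pixel levels for a given stack of images
--
--     Inputs: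
--     images: a stack of images
--
--     Outputs:
--     returns a sorted list of different pixel values
--     '''
--     flat = [k for i in images for j in i for k in j]
--     flat.sort()
--     out = []
--     last = None
--     for k in flat:
--         if last != k:
--             out.append(k)
--             last = k
--     return out
-- ===== Notes on version B (the rewrite author's own statement) =====
-- stated objective: faster
-- what changed: B flattens all pixels, sorts the full multiset once, and removes duplicates in a single adjacency pass over the sorted list, instead of A's per-pixel linear membership test into a growing list followed by a sort.
import Mathlib
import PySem

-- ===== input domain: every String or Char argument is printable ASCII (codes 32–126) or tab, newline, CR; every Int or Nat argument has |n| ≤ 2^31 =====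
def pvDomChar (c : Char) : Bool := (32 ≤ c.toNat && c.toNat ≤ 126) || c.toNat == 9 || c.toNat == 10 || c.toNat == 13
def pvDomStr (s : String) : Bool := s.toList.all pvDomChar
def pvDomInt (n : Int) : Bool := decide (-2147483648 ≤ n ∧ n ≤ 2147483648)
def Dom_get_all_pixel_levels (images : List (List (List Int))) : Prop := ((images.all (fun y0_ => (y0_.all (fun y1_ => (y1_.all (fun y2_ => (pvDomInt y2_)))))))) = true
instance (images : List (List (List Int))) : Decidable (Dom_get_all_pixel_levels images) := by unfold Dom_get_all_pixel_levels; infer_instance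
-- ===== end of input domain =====

-- B flattens all pixels, sorts once, and deduplicates adjacent equals in one pass,
-- replacing A's quadratic membership-test dedup followed by a sort (objective: faster).


-- ===== PORT A =====
-- temp.append(k) guarded by 'k not in temp', over three nested loops; then temp.sort()
def get_all_pixel_levels (images : List (List (List Int))) : List Int :=
  let temp : List Int :=
    images.foldl (fun temp i =>
      i.foldl (fun temp j =>
        j.foldl (fun temp k => if k ∈ temp then temp else temp ++ [k]) temp) temp) []
  PySem.List.sorted temp (fun x => x) false

-- ===== PORT B =====
-- flat = [k for i in images for j in i for k in j]; flat.sort(); single adjacency-dedup pass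
def get_all_pixel_levels_alt (images : List (List (List Int))) : List Int :=
  let flat : List Int := images.flatMap (fun i => i.flatMap (fun j => j.map (fun k => k)))
  let flatSorted := PySem.List.sorted flat (fun x => x) false
  -- out = []; last = None; for k in flatSorted: if last != k: out.append(k); last = k
  (flatSorted.foldl (fun (s : List Int × Option Int) k =>
      if s.2 ≠ some k then (s.1 ++ [k], some k) else s) (([] : List Int), (none : Option Int))).1

-- ===== PRECONDITION & SPEC =====
def Spec_get_all_pixel_levels (images : List (List (List Int))) (out : List Int) : Prop := out = get_all_pixel_levels_alt images
instance (images : List (List (List Int))) (out : List Int) : Decidable (Spec_get_all_pixel_levels images out) := by unfold Spec_get_all_pixel_levels; infer_instance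

-- ===== CLAIM (what is proved, stated in full; the proofs are below) =====
def Claim_equal_get_all_pixel_levels : Prop := ∀ (images : List (List (List Int))), Dom_get_all_pixel_levels images → Spec_get_all_pixel_levels images (get_all_pixel_levels images)

-- ===== LEMMAS AND PROOFS =====

-- A's accumulation step
def pvStepA (temp : List Int) (k : Int) : List Int := if k ∈ temp then temp else temp ++ [k]

-- recursive rendering of B's dedup pass (proof device)
def pvDedupAdj : Option Int → List Int → List Int
  | _, [] => []
  | last, k :: l => if last ≠ some k then k :: pvDedupAdj (some k) l else pvDedupAdj last l

lemma foldlB_eq_dedupAdj (l : List Int) : ∀ (acc : List Int) (last : Option Int),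
    (l.foldl (fun (s : List Int × Option Int) k =>
      if s.2 ≠ some k then (s.1 ++ [k], some k) else s) (acc, last)).1 = acc ++ pvDedupAdj last l := by
  induction l with
  | nil => intro acc last; simp [pvDedupAdj]
  | cons k l ih =>
    intro acc last
    rw [List.foldl_cons]
    by_cases h : last = some k
    · have e1 : (if (acc, last).2 ≠ some k then ((acc, last).1 ++ [k], some k) else (acc, last)) = (acc, last) := by simp [h]
      have e2 : pvDedupAdj last (k :: l) = pvDedupAdj last l := by simp [pvDedupAdj, h]
      rw [e1, e2, ih]
    · have e1 : (if (acc, last).2 ≠ some k then ((acc, last).1 ++ [k], some k) else (acc, last)) = (acc ++ [k], some k) := by simp [h]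
      have e2 : pvDedupAdj last (k :: l) = k :: pvDedupAdj (some k) l := by simp [pvDedupAdj, h]
      rw [e1, e2, ih]
      simp

lemma flattenA_inner (rows : List (List Int)) : ∀ (t : List Int),
    rows.foldl (fun temp j => j.foldl pvStepA temp) t = rows.flatten.foldl pvStepA t := by
  induction rows with
  | nil => intro t; simp
  | cons j rows ih =>
    intro t
    rw [List.foldl_cons, List.flatten_cons, List.foldl_append, ih]

lemma flattenA (images : List (List (List Int))) : ∀ (t : List Int),
    images.foldl (fun temp i => i.foldl (fun temp j => j.foldl pvStepA temp) temp) t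
      = (images.flatMap (fun i => i.flatten)).foldl pvStepA t := by
  induction images with
  | nil => intro t; simp
  | cons i images ih =>
    intro t
    rw [List.foldl_cons, List.flatMap_cons, List.foldl_append, ih, flattenA_inner]

lemma stepA_props (l : List Int) : ∀ (t : List Int),
    (∀ x, x ∈ l.foldl pvStepA t ↔ x ∈ t ∨ x ∈ l) ∧ (t.Nodup → (l.foldl pvStepA t).Nodup) := by
  induction l with
  | nil => intro t; simp
  | cons k l ih =>
    intro t
    constructor
    · intro x
      rw [List.foldl_cons, (ih (pvStepA t k)).1 x]
      unfold pvStepA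
      by_cases h : k ∈ t
      · simp only [if_pos h, List.mem_cons]
        constructor
        · rintro (hx | hx)
          · exact Or.inl hx
          · exact Or.inr (Or.inr hx)
        · rintro (hx | rfl | hx)
          · exact Or.inl hx
          · exact Or.inl h
          · exact Or.inr hx
      · simp only [if_neg h, List.mem_append, List.mem_cons]
        tauto
    · intro ht
      rw [List.foldl_cons]
      refine (ih (pvStepA t k)).2 ?_
      unfold pvStepA
      by_cases h : k ∈ t
      · simpa [h] using ht
      · simp only [if_neg h]
        exact List.nodup_append.mpr ⟨ht, List.nodup_singleton k, by intro a ha b hb heq; simp at hb; subst hb; exact h (heq ▸ ha)⟩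

-- under a sorted tail whose elements all dominate m, the dedup pass keeps exactly the values ≠ m, strictly increasing
lemma dedupAdj_some (l : List Int) : ∀ (m : Int), l.Pairwise (· ≤ ·) → (∀ y ∈ l, m ≤ y) →
    (pvDedupAdj (some m) l).Pairwise (· < ·) ∧ (∀ x, x ∈ pvDedupAdj (some m) l ↔ x ∈ l ∧ x ≠ m) := by
  induction l with
  | nil => intro m _ _; simp [pvDedupAdj]
  | cons k l ih =>
    intro m hp hm
    have hkl : ∀ y ∈ l, k ≤ y := (List.pairwise_cons.mp hp).1
    have hpl : l.Pairwise (· ≤ ·) := (List.pairwise_cons.mp hp).2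
    have hmk : m ≤ k := hm k (by simp)
    by_cases h : m = k
    · subst h
      have e : pvDedupAdj (some m) (m :: l) = pvDedupAdj (some m) l := by simp [pvDedupAdj]
      have := ih m hpl hkl
      rw [e]
      refine ⟨this.1, fun x => ?_⟩
      rw [this.2 x, List.mem_cons]
      constructor
      · rintro ⟨hx, hne⟩; exact ⟨Or.inr hx, hne⟩
      · rintro ⟨rfl | hx, hne⟩
        · exact absurd rfl hne
        · exact ⟨hx, hne⟩
    · have hmk' : m < k := lt_of_le_of_ne hmk h
      have e : pvDedupAdj (some m) (k :: l) = k :: pvDedupAdj (some k) l := by simp [pvDedupAdj, h]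
      have this := ih k hpl hkl
      rw [e]
      constructor
      · refine List.pairwise_cons.mpr ⟨fun y hy => ?_, this.1⟩
        have hy' := (this.2 y).mp hy
        exact lt_of_le_of_ne (hkl y hy'.1) (Ne.symm hy'.2)
      · intro x
        rw [List.mem_cons, this.2 x, List.mem_cons]
        constructor
        · rintro (rfl | ⟨hx, _⟩)
          · exact ⟨Or.inl rfl, (Ne.symm (ne_of_lt hmk'))⟩
          · exact ⟨Or.inr hx, (Ne.symm (ne_of_lt (hmk'.trans_le (hkl x hx))))⟩
        · rintro ⟨rfl | hx, hne⟩
          · exact Or.inl rfl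
          · by_cases hk : x = k
            · exact Or.inl hk
            · exact Or.inr ⟨hx, hk⟩

lemma dedupAdj_none (l : List Int) (hp : l.Pairwise (· ≤ ·)) :
    (pvDedupAdj none l).Pairwise (· < ·) ∧ (∀ x, x ∈ pvDedupAdj none l ↔ x ∈ l) := by
  cases l with
  | nil => simp [pvDedupAdj]
  | cons k l =>
    have hkl : ∀ y ∈ l, k ≤ y := (List.pairwise_cons.mp hp).1
    have hpl : l.Pairwise (· ≤ ·) := (List.pairwise_cons.mp hp).2
    have h := dedupAdj_some l k hpl hkl
    have e : pvDedupAdj none (k :: l) = k :: pvDedupAdj (some k) l := by simp [pvDedupAdj]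
    rw [e]
    constructor
    · refine List.pairwise_cons.mpr ⟨fun y hy => ?_, h.1⟩
      have hy' := (h.2 y).mp hy
      exact lt_of_le_of_ne (hkl y hy'.1) (Ne.symm hy'.2)
    · intro x
      rw [List.mem_cons, h.2 x, List.mem_cons]
      constructor
      · rintro (rfl | ⟨hx, _⟩)
        · exact Or.inl rfl
        · exact Or.inr hx
      · rintro (rfl | hx)
        · exact Or.inl rfl
        · by_cases hk : x = k
          · exact Or.inl hk
          · exact Or.inr ⟨hx, hk⟩

-- ===== VERDICT (by name: the statement is the Claim_ definition above) =====
theorem get_all_pixel_levels_spec : Claim_equal_get_all_pixel_levels := by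
  intro images _
  unfold Spec_get_all_pixel_levels get_all_pixel_levels get_all_pixel_levels_alt
  have hflat : images.flatMap (fun i => i.flatMap (fun j => j.map (fun k => k)))
      = images.flatMap (fun i => i.flatten) := by
    simp
  rw [hflat]
  set flat := images.flatMap (fun i => i.flatten) with hflatd
  have htemp : images.foldl (fun temp i => i.foldl (fun temp j =>
      j.foldl (fun temp k => if k ∈ temp then temp else temp ++ [k]) temp) temp) []
      = flat.foldl pvStepA [] := by
    rw [show (fun temp k => if k ∈ temp then temp else temp ++ [k]) = pvStepA from rfl]
    exact flattenA images []
  rw [htemp, foldlB_eq_dedupAdj, List.nil_append]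
  set fs := PySem.List.sorted flat (fun x => x) false with hfs
  have hps : fs.Pairwise (· ≤ ·) := by
    simpa using PySem.List.sorted_pairwise (xs := flat) (key := fun x => x)
  obtain ⟨hlt, hmem⟩ := dedupAdj_none fs hps
  obtain ⟨hmt, hnt⟩ := stepA_props flat []
  have hperm : List.Perm (pvDedupAdj none fs) (flat.foldl pvStepA []) := by
    refine (List.perm_ext_iff_of_nodup (hlt.imp (fun h => ne_of_lt h)) (hnt (by simp))).mpr ?_
    intro a
    rw [hmem a, hmt a]
    simp [hfs, PySem.List.mem_sorted]
  have hlt' : (pvDedupAdj none fs).Pairwise (fun a b => (fun x : Int => x) a < (fun x : Int => x) b) := by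
    simpa using hlt
  exact PySem.List.sorted_eq_of_perm_of_pairwise_lt _ _ (fun x => x) hperm hlt'
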